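-- pv_equiv track=rewrite | github.com/Ambient567/V0-Python-Velisa | Python-basics/decomposition/C-composition/lala_language.py | change_vowel
-- ===== SOURCE A (Python) =====
-- def change_vowel(word):
--     vowels = "aeiou"
--     changed_word = ""
--
--     for char in word:
--         if char in vowels:
--             changed_word += char + "l" + char
--         else:
--             changed_word += char
--
--     return changed_word
-- ===== SOURCE B (Python) =====
-- def change_vowel(word):
--     for v in "aeiou":
--         word = word.replace(v, v + "l" + v)
--     return word
-- ===== Notes on version B (the rewrite author's own statement) =====
-- stated objective: faster
-- what changed: Replaces the per-character accumulate-in-a-loop with five staged whole-string str.replace passes, one per vowel; this is correct because each pass only inserts the separator letter and copies of its own vowel, which no later pass matches.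
import Mathlib
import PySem

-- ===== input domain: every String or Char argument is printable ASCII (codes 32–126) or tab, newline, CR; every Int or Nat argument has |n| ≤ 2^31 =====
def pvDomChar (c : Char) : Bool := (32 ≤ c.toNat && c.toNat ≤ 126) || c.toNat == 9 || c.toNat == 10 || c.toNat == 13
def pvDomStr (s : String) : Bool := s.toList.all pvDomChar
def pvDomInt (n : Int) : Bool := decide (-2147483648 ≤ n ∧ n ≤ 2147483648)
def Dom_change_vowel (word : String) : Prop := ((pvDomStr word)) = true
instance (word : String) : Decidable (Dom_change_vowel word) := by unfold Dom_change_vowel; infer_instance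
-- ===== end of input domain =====

-- B replaces A's per-character accumulate-in-a-loop with five staged whole-string replace passes, one per vowel (alternative decomposition).

-- ===== PORT A =====
-- for char in word: if char in vowels then changed_word += char+"l"+char else changed_word += char
def change_vowel (word : String) : String :=
  String.ofList (word.toList.foldl
    (fun acc c => if c ∈ "aeiou".toList then acc ++ [c, 'l', c] else acc ++ [c]) [])

-- ===== PORT B =====
-- for v in "aeiou": word = word.replace(v, v + "l" + v)
def change_vowel_alt (word : String) : String :=
  "aeiou".toList.foldl
    (fun w v => PySem.Str.replace w (String.ofList [v]) (String.ofList [v, 'l', v])) word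

-- ===== PRECONDITION & SPEC =====
def Spec_change_vowel (word : String) (out : String) : Prop := out = change_vowel_alt word
instance (word : String) (out : String) : Decidable (Spec_change_vowel word out) := by unfold Spec_change_vowel; infer_instance

-- ===== CLAIM (what is proved, stated in full; the proofs are below) =====
def Claim_equal_change_vowel : Prop := ∀ (word : String), Dom_change_vowel word → Spec_change_vowel word (change_vowel word)

-- ===== LEMMAS AND PROOFS =====
-- replace with a single-character pattern is the per-character substitution (fuel-indexed loop)
lemma replace_go_single (v : Char) (new : List Char) :
    ∀ (fuel : Nat) (l acc : List Char), l.length ≤ fuel →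
      PySem.Chars.replace.go [v] new fuel l acc
        = acc.reverse ++ l.flatMap (fun c => if c = v then new else [c]) := by
  intro fuel
  induction fuel with
  | zero =>
    intro l acc h
    have : l = [] := List.length_eq_zero_iff.mp (Nat.le_zero.mp h)
    subst this
    simp [PySem.Chars.replace.go]
  | succ n ih =>
    intro l acc h
    cases l with
    | nil => simp [PySem.Chars.replace.go]
    | cons c t =>
      simp only [List.length_cons, Nat.succ_le_succ_iff] at h
      by_cases hc : c = v
      · subst hc
        have hp : List.isPrefixOf [c] (c :: t) = true := by
          simp [List.isPrefixOf]
        rw [PySem.Chars.replace.go, if_pos hp]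
        simp only [List.length_cons, List.length_nil, List.drop_succ_cons, List.drop_zero]
        rw [ih t (new.reverse ++ acc) h]
        simp [List.flatMap_cons]
      · have hp : List.isPrefixOf [v] (c :: t) = false := by
          simp only [List.isPrefixOf, Bool.and_eq_false_iff, beq_eq_false_iff_ne]
          exact Or.inl fun hvc => hc hvc.symm
        rw [PySem.Chars.replace.go, if_neg (by simp [hp])]
        rw [ih t (c :: acc) h]
        simp [List.flatMap_cons, hc]

lemma replace_single (v : Char) (new s : List Char) :
    PySem.Chars.replace s [v] new = s.flatMap (fun c => if c = v then new else [c]) := by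
  rw [PySem.Chars.replace, if_neg (by simp)]
  simpa using replace_go_single v new s.length s [] le_rfl

-- the per-character substitution A performs
def pvSub (c : Char) : List Char := if c ∈ "aeiou".toList then [c, 'l', c] else [c]

lemma strRepl_toList (v : Char) (w : String) :
    (PySem.Str.replace w (String.ofList [v]) (String.ofList [v, 'l', v])).toList
      = w.toList.flatMap (fun c => if c = v then [v, 'l', v] else [c]) := by
  simp only [PySem.Str.replace, String.toList_ofList, replace_single]

-- the five single-vowel passes compose, per character, to A's substitution
lemma charwise (c : Char) :
    pvSub c
      = ((if c = 'a' then ['a','l','a'] else [c]).flatMap (fun d1 =>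
          (if d1 = 'e' then ['e','l','e'] else [d1]).flatMap (fun d2 =>
            (if d2 = 'i' then ['i','l','i'] else [d2]).flatMap (fun d3 =>
              (if d3 = 'o' then ['o','l','o'] else [d3]).flatMap (fun d4 =>
                if d4 = 'u' then ['u','l','u'] else [d4]))))) := by
  by_cases h : c ∈ "aeiou".toList
  · fin_cases h <;> rfl
  · simp only [show "aeiou".toList = ['a','e','i','o','u'] from rfl, List.mem_cons,
      List.not_mem_nil, or_false, not_or] at h
    obtain ⟨h1, h2, h3, h4, h5⟩ := h
    simp [pvSub, h1, h2, h3, h4, h5, List.flatMap_cons,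
      show "aeiou".toList = ['a','e','i','o','u'] from rfl]

-- ===== VERDICT (by name: the statement is the Claim_ definition above) =====
theorem change_vowel_spec : Claim_equal_change_vowel := by
  intro word _
  unfold Spec_change_vowel change_vowel change_vowel_alt
  -- A as a flatMap
  have hA : (word.toList.foldl
      (fun acc c => if c ∈ "aeiou".toList then acc ++ [c, 'l', c] else acc ++ [c]) [])
      = word.toList.flatMap pvSub := by
    have hf : (fun (acc : List Char) c => if c ∈ "aeiou".toList then acc ++ [c, 'l', c] else acc ++ [c])
        = (fun acc c => acc ++ pvSub c) := by
      funext a c; unfold pvSub; split <;> rfl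
    rw [hf, PySem.List.foldl_append_eq_flatMap]
    simp
  rw [hA]
  -- B: the fold is five nested replace passes
  have hfold : "aeiou".toList.foldl
      (fun w v => PySem.Str.replace w (String.ofList [v]) (String.ofList [v, 'l', v])) word
      = PySem.Str.replace (PySem.Str.replace (PySem.Str.replace (PySem.Str.replace
          (PySem.Str.replace word (String.ofList ['a']) (String.ofList ['a','l','a']))
          (String.ofList ['e']) (String.ofList ['e','l','e']))
          (String.ofList ['i']) (String.ofList ['i','l','i']))
          (String.ofList ['o']) (String.ofList ['o','l','o']))
          (String.ofList ['u']) (String.ofList ['u','l','u']) := rfl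
  rw [hfold]
  -- compare via toList
  apply String.toList_inj.mp
  rw [strRepl_toList, strRepl_toList, strRepl_toList, strRepl_toList, strRepl_toList]
  rw [List.flatMap_assoc, List.flatMap_assoc, List.flatMap_assoc, List.flatMap_assoc]
  simp only [String.toList_ofList]
  exact congrArg word.toList.flatMap (funext charwise)
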